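-- pv_equiv track=rewrite | github.com/hdoi/op_tools | op_tools/neighbor_build.py | build_neighbor_cell
-- ===== SOURCE A (Python) =====
-- def build_neighbor_cell(cell, cell_size):
--     # input  : [0,0,0]
--     # output : if cell_size == [4,4,4] , [-1,0,0] => [3,0,0], [4,0,0] =>
--     # [0,0,0]
--     neighbor = [[cell[0] + ix, cell[1] + iy, cell[2] + iz]
--                 for ix in range(-1, 2)
--                 for iy in range(-1, 2)
--                 for iz in range(-1, 2)]
--     for i in range(3**3):
--         for j in range(3):
--             if neighbor[i][j] == -1:
--                 neighbor[i][j] = cell_size[j] - 1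
--             elif neighbor[i][j] == cell_size[j]:
--                 neighbor[i][j] = 0
--     return neighbor
-- ===== SOURCE B (Python) =====
-- def _axis(c, size):
--     # the three wrapped coordinate values this axis contributes
--     out = []
--     for v in (c - 1, c, c + 1):
--         if v == -1:
--             out.append(size - 1)
--         elif v == size:
--             out.append(0)
--         else:
--             out.append(v)
--     return out
--
--
-- def build_neighbor_cell(cell, cell_size):
--     ax = _axis(cell[0], cell_size[0])
--     ay = _axis(cell[1], cell_size[1])
--     az = _axis(cell[2], cell_size[2])
--     return [[x, y, z] for x in ax for y in ay for z in az]
-- ===== Notes on version B (the rewrite author's own statement) =====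
-- stated objective: alternative
-- what changed: A builds all 27 neighbor rows and then runs a second 27x3 in-place correction pass over them; B never touches rows: it precomputes per axis the list of its three wrapped coordinate values (9 wrap computations total) and returns the Cartesian product of those three lists.
import Mathlib
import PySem

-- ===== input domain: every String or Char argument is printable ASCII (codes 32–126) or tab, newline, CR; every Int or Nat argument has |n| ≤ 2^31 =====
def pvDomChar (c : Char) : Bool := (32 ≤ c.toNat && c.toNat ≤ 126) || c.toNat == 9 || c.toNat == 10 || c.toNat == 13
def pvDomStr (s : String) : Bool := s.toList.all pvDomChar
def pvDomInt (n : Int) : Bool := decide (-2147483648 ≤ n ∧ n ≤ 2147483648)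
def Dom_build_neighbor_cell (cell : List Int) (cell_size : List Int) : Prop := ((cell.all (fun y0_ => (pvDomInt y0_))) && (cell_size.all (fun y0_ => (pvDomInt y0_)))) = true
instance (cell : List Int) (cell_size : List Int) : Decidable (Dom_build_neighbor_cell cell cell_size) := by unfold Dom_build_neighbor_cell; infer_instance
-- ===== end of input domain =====

-- B replaces A's build-27-rows-then-patch-them pass with per-axis precomputation: each axis's three
-- wrapped coordinate values are computed once and the result is their Cartesian product (objective:
-- alternative; A mutates only a local list, so the return value is all there is to compare).

-- ===== PORT A =====
def build_neighbor_cell (cell : List Int) (cell_size : List Int) : List (List Int) :=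
  let neighbor : List (List Int) :=
    (PySem.List.pyRange (-1) 2 1).flatMap (fun ix =>
      (PySem.List.pyRange (-1) 2 1).flatMap (fun iy =>
        (PySem.List.pyRange (-1) 2 1).map (fun iz =>
          [PySem.List.pyGetD cell 0 0 + ix,
           PySem.List.pyGetD cell 1 0 + iy,
           PySem.List.pyGetD cell 2 0 + iz])))
  (PySem.List.pyRange 0 27 1).foldl (fun nb i =>
    (PySem.List.pyRange 0 3 1).foldl (fun nb j =>
      let row := PySem.List.pyGetD nb i []
      if PySem.List.pyGetD row j 0 = -1 then
        nb.set i.toNat (row.set j.toNat (PySem.List.pyGetD cell_size j 0 - 1))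
      else if PySem.List.pyGetD row j 0 = PySem.List.pyGetD cell_size j 0 then
        nb.set i.toNat (row.set j.toNat 0)
      else nb) nb) neighbor

-- ===== PORT B =====
-- Source B's _axis: the three wrapped values [c-1, c, c+1] contribute on this axis
def axisWrap (c size : Int) : List Int :=
  [c - 1, c, c + 1].map (fun v =>
    if v = -1 then size - 1
    else if v = size then 0
    else v)

def build_neighbor_cell_alt (cell : List Int) (cell_size : List Int) : List (List Int) :=
  let ax := axisWrap (PySem.List.pyGetD cell 0 0) (PySem.List.pyGetD cell_size 0 0)
  let ay := axisWrap (PySem.List.pyGetD cell 1 0) (PySem.List.pyGetD cell_size 1 0)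
  let az := axisWrap (PySem.List.pyGetD cell 2 0) (PySem.List.pyGetD cell_size 2 0)
  ax.flatMap (fun x => ay.flatMap (fun y => az.map (fun z => [x, y, z])))

-- ===== PRECONDITION & SPEC =====
-- Pre_ excludes exactly the inputs on which Python A raises IndexError: a cell or cell_size with fewer than three elements.
def Pre_build_neighbor_cell (cell : List Int) (cell_size : List Int) : Prop :=
  3 ≤ cell.length ∧ 3 ≤ cell_size.length
instance (cell : List Int) (cell_size : List Int) : Decidable (Pre_build_neighbor_cell cell cell_size) := by unfold Pre_build_neighbor_cell; infer_instance

def pvWitness_build_neighbor_cell : List Int × List Int := ([0, 0, 0], [4, 4, 4])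

def Spec_build_neighbor_cell (cell : List Int) (cell_size : List Int) (out : List (List Int)) : Prop := out = build_neighbor_cell_alt cell cell_size
instance (cell : List Int) (cell_size : List Int) (out : List (List Int)) : Decidable (Spec_build_neighbor_cell cell cell_size out) := by unfold Spec_build_neighbor_cell; infer_instance

-- ===== CLAIM (what is proved, stated in full; the proofs are below) =====
def Claim_equal_build_neighbor_cell : Prop := ∀ (cell : List Int) (cell_size : List Int), Dom_build_neighbor_cell cell cell_size → Pre_build_neighbor_cell cell cell_size → Spec_build_neighbor_cell cell cell_size (build_neighbor_cell cell cell_size)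

-- ===== LEMMAS AND PROOFS =====

-- the scalar wrap A's patch pass and B's axis lists both implement
def pyWrap (v : Int) (size : Int) : Int :=
  if v = -1 then size - 1
  else if v = size then 0
  else v

-- one (i,j) step of A's correction pass, seen on the row it touches
def rowstep (cell_size : List Int) (row : List Int) (j : Int) : List Int :=
  if PySem.List.pyGetD row j 0 = -1 then row.set j.toNat (PySem.List.pyGetD cell_size j 0 - 1)
  else if PySem.List.pyGetD row j 0 = PySem.List.pyGetD cell_size j 0 then row.set j.toNat 0
  else row

-- A's whole inner j-loop, seen on one row
def rowfix (cell_size : List Int) (row : List Int) : List Int :=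
  rowstep cell_size (rowstep cell_size (rowstep cell_size row 0) 1) 2

theorem rs0 (cs : List Int) (x y z : Int) :
    rowstep cs [x, y, z] 0 = [pyWrap x (PySem.List.pyGetD cs 0 0), y, z] := by
  simp only [rowstep, pyWrap, PySem.List.pyGetD_zero_cons, Int.toNat_zero, List.set]
  split_ifs <;> rfl

theorem rs1 (cs : List Int) (x y z : Int) :
    rowstep cs [x, y, z] 1 = [x, pyWrap y (PySem.List.pyGetD cs 1 0), z] := by
  have h : PySem.List.pyGetD [x, y, z] 1 0 = y := by simp [PySem.List.pyGetD_ofNat']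
  simp only [rowstep, pyWrap, h]
  split_ifs <;> rfl

theorem rs2 (cs : List Int) (x y z : Int) :
    rowstep cs [x, y, z] 2 = [x, y, pyWrap z (PySem.List.pyGetD cs 2 0)] := by
  have h : PySem.List.pyGetD [x, y, z] 2 0 = z := by simp [PySem.List.pyGetD_ofNat']
  simp only [rowstep, pyWrap, h]
  split_ifs <;> rfl

-- A's inner loop on a literal row is exactly the three scalar wraps
theorem rowfix_triple (cs : List Int) (x y z : Int) :
    rowfix cs [x, y, z] =
      [pyWrap x (PySem.List.pyGetD cs 0 0),
       pyWrap y (PySem.List.pyGetD cs 1 0),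
       pyWrap z (PySem.List.pyGetD cs 2 0)] := by
  rw [rowfix, rs0, rs1, rs2]

theorem set_getD_self (nb : List (List Int)) (i : Int) (hi : 0 ≤ i) :
    nb.set i.toNat (PySem.List.pyGetD nb i []) = nb := by
  rcases lt_or_ge i.toNat nb.length with h | h
  · rw [PySem.List.pyGetD_eq_getElem nb [] hi (by omega)]
    exact List.set_getElem_self h
  · exact List.set_eq_of_length_le h

theorem getD_set_self (nb : List (List Int)) (i : Int) (hi : 0 ≤ i)
    (h : i.toNat < nb.length) (r : List Int) :
    PySem.List.pyGetD (nb.set i.toNat r) i [] = r := by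
  rw [PySem.List.pyGetD_eq_getElem _ [] hi (by simp; omega)]
  simp

-- one (i,j) step of A's correction loop = functional update of row i
theorem step_set (cs : List Int) (nb : List (List Int)) (i j : Int) (hi : 0 ≤ i) :
    (let row := PySem.List.pyGetD nb i []
     if PySem.List.pyGetD row j 0 = -1 then
       nb.set i.toNat (row.set j.toNat (PySem.List.pyGetD cs j 0 - 1))
     else if PySem.List.pyGetD row j 0 = PySem.List.pyGetD cs j 0 then
       nb.set i.toNat (row.set j.toNat 0)
     else nb)
    = nb.set i.toNat (rowstep cs (PySem.List.pyGetD nb i []) j) := by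
  simp only [rowstep]
  split_ifs with h1 h2
  · rfl
  · rfl
  · exact (set_getD_self nb i hi).symm

-- A's inner j-loop = set row i to rowfix of row i
theorem inner_fold_set (cs : List Int) (nb : List (List Int)) (i : Int) (hi : 0 ≤ i) :
    (PySem.List.pyRange 0 3 1).foldl (fun nb j =>
      let row := PySem.List.pyGetD nb i []
      if PySem.List.pyGetD row j 0 = -1 then
        nb.set i.toNat (row.set j.toNat (PySem.List.pyGetD cs j 0 - 1))
      else if PySem.List.pyGetD row j 0 = PySem.List.pyGetD cs j 0 then
        nb.set i.toNat (row.set j.toNat 0)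
      else nb) nb
    = nb.set i.toNat (rowfix cs (PySem.List.pyGetD nb i [])) := by
  have hr : PySem.List.pyRange 0 3 1 = [0, 1, 2] := by decide
  rw [hr]
  simp only [List.foldl_cons, List.foldl_nil]
  rw [step_set cs nb i 0 hi, step_set cs _ i 1 hi, step_set cs _ i 2 hi]
  rcases lt_or_ge i.toNat nb.length with h | h
  · rw [getD_set_self nb i hi h]
    rw [getD_set_self (nb.set i.toNat (rowstep cs (PySem.List.pyGetD nb i []) 0)) i hi (by simpa using h)]
    rw [List.set_set, List.set_set]
    rfl
  · have hs : ∀ r : List Int, nb.set i.toNat r = nb := fun r => List.set_eq_of_length_le h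
    simp only [hs]

-- a fold over indices 0..len-1 setting slot i to f of slot i is a map
theorem foldl_set_map (f : List Int → List Int) :
    ∀ (v u : List (List Int)),
    ((List.range v.length).map (fun k => ((u.length + k : Nat) : Int))).foldl
      (fun acc i => acc.set i.toNat (f (PySem.List.pyGetD acc i []))) (u ++ v)
    = u ++ v.map f := by
  intro v
  induction v with
  | nil => intro u; simp
  | cons a v ih =>
    intro u
    rw [List.length_cons, List.range_succ_eq_map]
    simp only [List.map_cons, List.map_map]
    rw [List.foldl_cons]
    have h1 : (u ++ a :: v).set ((u.length + 0 : Nat) : Int).toNat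
        (f (PySem.List.pyGetD (u ++ a :: v) ((u.length + 0 : Nat) : Int) [])) = u ++ f a :: v := by
      rw [PySem.List.pyGetD_natCast]
      simp
    rw [h1]
    have h2 : ((List.range v.length).map (fun k => (((u.length + (k + 1) : Nat)) : Int)))
        = (List.range v.length).map (fun k => (((u ++ [f a]).length + k : Nat) : Int)) := by
      apply List.map_congr_left
      intro k _
      congr 1
      simp
      omega
    have h3 : u ++ f a :: v = (u ++ [f a]) ++ v := by simp
    calc ((List.range v.length).map fun k => (((u.length + (k + 1) : Nat)) : Int)).foldl
          (fun acc i => acc.set i.toNat (f (PySem.List.pyGetD acc i []))) (u ++ f a :: v)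
        = ((List.range v.length).map (fun k => (((u ++ [f a]).length + k : Nat) : Int))).foldl
          (fun acc i => acc.set i.toNat (f (PySem.List.pyGetD acc i []))) ((u ++ [f a]) ++ v) := by
          rw [h2, h3]
      _ = (u ++ [f a]) ++ v.map f := ih (u ++ [f a])
      _ = u ++ (a :: v).map f := by simp

theorem foldl_set_map0 (f : List Int → List Int) (v : List (List Int)) :
    ((List.range v.length).map (fun k : Nat => (k : Int))).foldl
      (fun acc i => acc.set i.toNat (f (PySem.List.pyGetD acc i []))) v
    = v.map f := by
  have h := foldl_set_map f v []
  simp only [List.nil_append, List.length_nil, Nat.zero_add] at h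
  exact h

-- B's axis list is the pointwise wrap of the three offset coordinates
theorem axisWrap_eq (c s : Int) :
    axisWrap c s = ([(-1 : Int), 0, 1]).map (fun ix => pyWrap (c + ix) s) := by
  simp only [axisWrap, pyWrap, List.map_cons, List.map_nil]
  norm_num [sub_eq_add_neg]

theorem build_eq (cell cs : List Int) :
    build_neighbor_cell cell cs = build_neighbor_cell_alt cell cs := by
  rw [build_neighbor_cell]
  set N : List (List Int) :=
    (PySem.List.pyRange (-1) 2 1).flatMap (fun ix =>
      (PySem.List.pyRange (-1) 2 1).flatMap (fun iy =>
        (PySem.List.pyRange (-1) 2 1).map (fun iz =>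
          [PySem.List.pyGetD cell 0 0 + ix,
           PySem.List.pyGetD cell 1 0 + iy,
           PySem.List.pyGetD cell 2 0 + iz]))) with hN
  have hr : PySem.List.pyRange (-1) 2 1 = [-1, 0, 1] := by decide
  have hNlen : N.length = 27 := by rw [hN, hr]; rfl
  rw [PySem.List.foldl_congr_mem _ _
      (fun acc i => acc.set i.toNat (rowfix cs (PySem.List.pyGetD acc i []))) N
      (fun acc i hi => inner_fold_set cs acc i (PySem.List.mem_pyRange_one.mp hi).1)]
  rw [show PySem.List.pyRange 0 27 1 = (List.range (27 : Nat)).map (fun k : Nat => (k : Int)) from by decide]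
  rw [← hNlen, foldl_set_map0]
  rw [hN, build_neighbor_cell_alt]
  simp only [hr, axisWrap_eq, List.flatMap_map, List.map_flatMap, List.map_map,
    Function.comp_def, rowfix_triple]

-- ===== VERDICT (by name: the statement is the Claim_ definition above) =====
theorem build_neighbor_cell_spec : Claim_equal_build_neighbor_cell := by
  intro cell cell_size _ _
  exact build_eq cell cell_size
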